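-- pv_equiv track=rewrite | github.com/diya11patel/code_assistant | langugae_processors/php_processor.py | _extract_blade_metadata
-- ===== SOURCE A (Python) =====
-- from typing import Dict, List, Any, Optional
--
-- def _extract_blade_metadata(content: str) -> Dict[str, Any]:
--     """Extract metadata from Blade templates"""
--     metadata = {}
--
--     # Count Blade directives
--     blade_directives = ['@extends', '@section', '@yield', '@include', '@component']
--     for directive in blade_directives:
--         count = content.count(directive)
--         if count > 0:
--             metadata[directive.replace('@', '')] = count
--
--     return metadata
-- ===== SOURCE B (Python) =====
-- def _extract_blade_metadata(content: str):
--     """Extract metadata from Blade templates (single-pass scan + frequency table)."""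
--     blade_directives = ['@extends', '@section', '@yield', '@include', '@component']
--     counts = {}
--     i = 0
--     n = len(content)
--     while i < n:
--         match = next((d for d in blade_directives if content.startswith(d, i)), None)
--         if match is not None:
--             counts[match] = counts.get(match, 0) + 1
--             i += len(match)
--         else:
--             i += 1
--     return {d[1:]: counts[d] for d in blade_directives if d in counts}
-- ===== Notes on version B (the rewrite author's own statement) =====
-- stated objective: alternative
-- what changed: Replaces five independent str.count passes with a single left-to-right scan that tallies every directive hit into one frequency table, then copies the nonzero counts in directive order.
import Mathlib
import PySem

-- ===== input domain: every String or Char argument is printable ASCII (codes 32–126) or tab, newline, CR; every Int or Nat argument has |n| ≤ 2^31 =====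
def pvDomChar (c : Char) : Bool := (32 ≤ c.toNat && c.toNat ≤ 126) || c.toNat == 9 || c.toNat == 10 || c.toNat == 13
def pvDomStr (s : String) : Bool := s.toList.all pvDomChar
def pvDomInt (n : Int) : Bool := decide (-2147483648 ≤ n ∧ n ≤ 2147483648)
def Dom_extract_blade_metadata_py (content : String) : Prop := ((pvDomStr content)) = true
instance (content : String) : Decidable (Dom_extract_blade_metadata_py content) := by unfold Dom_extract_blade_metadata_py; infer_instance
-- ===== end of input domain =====

-- B replaces five independent str.count passes by a single left-to-right scan tallying
-- every directive hit into one frequency table (objective: alternative, same cost class).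

-- ===== PORT A =====
-- literal port of A: five content.count(directive) passes, conditional dict insertion
def extract_blade_metadata_py (content : String) : List (String × Int) :=
  let blade_directives : List String := ["@extends", "@section", "@yield", "@include", "@component"]
  (blade_directives.foldl
    (fun (metadata : PySem.Dict String Int) directive =>
      let count : Int := (PySem.Str.count content directive : Int)
      if 0 < count then metadata.insert (PySem.Str.replace directive "@" "") count
      else metadata)
    PySem.Dict.empty).items

-- ===== PORT B =====
def bladeDirectives : List String := ["@extends", "@section", "@yield", "@include", "@component"]

-- the while-loop of Source B: at position i, find the first directive starting there;
-- on a hit bump its tally and jump past it, otherwise advance one character.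
-- ('content.startswith(d, i)' on the remaining suffix; 'i += len(match)' = drop (len-1) of the tail)
def bladeScan : List Char → PySem.Dict String Int → PySem.Dict String Int
  | [], counts => counts
  | c :: t, counts =>
    match bladeDirectives.find? (fun d => PySem.Chars.startswith (c :: t) d.toList) with
    | some d => bladeScan (t.drop (d.toList.length - 1)) (counts.insert d (counts.getD d 0 + 1))
    | none => bladeScan t counts
termination_by l _ => l.length
decreasing_by
  · simp only [List.length_drop, List.length_cons]; omega
  · simp

def extract_blade_metadata_py_alt (content : String) : List (String × Int) :=
  let counts := bladeScan content.toList PySem.Dict.empty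
  -- the final dict comprehension {d[1:]: counts[d] for d in blade_directives if d in counts}
  (bladeDirectives.foldl
    (fun (m : PySem.Dict String Int) d =>
      if counts.contains d then m.insert (PySem.Str.slice d (some 1) none) (counts.getD d 0)
      else m)
    PySem.Dict.empty).items

-- ===== PRECONDITION & SPEC =====
def Spec_extract_blade_metadata_py (content : String) (out : List (String × Int)) : Prop := out = extract_blade_metadata_py_alt content
instance (content : String) (out : List (String × Int)) : Decidable (Spec_extract_blade_metadata_py content out) := by unfold Spec_extract_blade_metadata_py; infer_instance

-- ===== CLAIM (what is proved, stated in full; the proofs are below) =====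
def Claim_equal_extract_blade_metadata_py : Prop := ∀ (content : String), Dom_extract_blade_metadata_py content → Spec_extract_blade_metadata_py content (extract_blade_metadata_py content)

-- ===== LEMMAS AND PROOFS =====

-- the list of directive hits produced by B's scan, in scan order (proof-side mirror of bladeScan)
def bladeTokens : List Char → List String
  | [] => []
  | c :: t =>
    match bladeDirectives.find? (fun d => PySem.Chars.startswith (c :: t) d.toList) with
    | some d => d :: bladeTokens (t.drop (d.toList.length - 1))
    | none => bladeTokens t
termination_by l => l.length
decreasing_by
  · simp only [List.length_drop, List.length_cons]; omega
  · simp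

-- decidable facts about the five concrete directives
lemma blade_nonempty : ∀ d ∈ bladeDirectives, d.toList ≠ [] := by decide

lemma blade_head : ∀ d ∈ bladeDirectives, d.toList.head? = some '@' := by decide

lemma blade_interior : ∀ d ∈ bladeDirectives, ∀ j, 1 ≤ j → j < d.toList.length →
    d.toList[j]? ≠ some '@' := by decide

lemma blade_noprefix : ∀ d₁ ∈ bladeDirectives, ∀ d₂ ∈ bladeDirectives, d₁ ≠ d₂ →
    ¬ d₁.toList <+: d₂.toList := by decide

-- at most one directive matches at a given position
lemma blade_unique {d₁ d₂ : String} (h₁ : d₁ ∈ bladeDirectives) (h₂ : d₂ ∈ bladeDirectives)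
    {l : List Char} (p₁ : d₁.toList <+: l) (p₂ : d₂.toList <+: l) : d₁ = d₂ := by
  by_contra hne
  rcases List.prefix_or_prefix_of_prefix p₁ p₂ with h | h
  · exact blade_noprefix d₁ h₁ d₂ h₂ hne h
  · exact blade_noprefix d₂ h₂ d₁ h₁ (Ne.symm hne) h

-- the scan is the Counter of the token list
lemma bladeScan_eq_foldl : ∀ (l : List Char) (counts : PySem.Dict String Int),
    bladeScan l counts
      = (bladeTokens l).foldl (fun d x => d.insert x (d.getD x 0 + 1)) counts := by
  intro l
  induction l using bladeTokens.induct with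
  | case1 => intro counts; simp [bladeScan, bladeTokens]
  | case2 c t d hfind ih =>
      intro counts
      rw [bladeScan, bladeTokens, hfind]
      simp only [List.foldl_cons]
      exact ih _
  | case3 c t hfind ih =>
      intro counts
      rw [bladeScan, bladeTokens, hfind]
      exact ih counts

lemma bladeScan_empty (l : List Char) :
    bladeScan l PySem.Dict.empty = PySem.Dict.counter (bladeTokens l) := by
  rw [bladeScan_eq_foldl, PySem.Dict.foldl_insert_getD_add_one_eq_counter]

-- count.go walks one character at a time past positions where d does not match
lemma go_skip (d : String) : ∀ (k : Nat) (t : List Char) (fuel acc : Nat),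
    k ≤ t.length → k ≤ fuel →
    (∀ j, j < k → ¬ d.toList.isPrefixOf (t.drop j) = true) →
    PySem.Chars.count.go d.toList fuel t acc
      = PySem.Chars.count.go d.toList (fuel - k) (t.drop k) acc := by
  intro k
  induction k with
  | zero => intro t fuel acc _ _ _; simp
  | succ k ih =>
      intro t fuel acc hlen hfuel hno
      match t, fuel with
      | c :: t', f + 1 =>
          have h0 : ¬ d.toList.isPrefixOf (c :: t') = true := by
            simpa using hno 0 (Nat.succ_pos k)
          rw [PySem.Chars.count.go]
          simp only [Bool.not_eq_true] at h0
          rw [h0]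
          simp only [List.drop_succ_cons]
          have := ih t' f acc (by simpa using Nat.lt_of_succ_le hlen)
            (by omega) (fun j hj => by simpa using hno (j + 1) (by omega))
          simpa [Nat.succ_sub_succ] using this

-- core: the non-overlapping count of d equals d's multiplicity in the scan's token list
lemma count_go_tokens (d : String) (hd : d ∈ bladeDirectives) :
    ∀ (n : Nat) (l : List Char) (fuel acc : Nat), l.length = n → l.length ≤ fuel →
      PySem.Chars.count.go d.toList fuel l acc = acc + (bladeTokens l).count d := by
  intro n
  induction n using Nat.strong_induction_on with
  | _ n IH =>
      intro l fuel acc hn hfu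
      match l with
      | [] => cases fuel <;> simp [PySem.Chars.count.go, bladeTokens]
      | c :: t =>
          obtain ⟨f, rfl⟩ : ∃ f, fuel = f + 1 := ⟨fuel - 1, by simp at hfu ⊢; omega⟩
          cases hfind : bladeDirectives.find? (fun d' => PySem.Chars.startswith (c :: t) d'.toList) with
          | none =>
              have hnp : ¬ d.toList.isPrefixOf (c :: t) = true := by
                intro h
                have := List.find?_eq_none.mp hfind d hd
                rw [PySem.Chars.startswith_iff] at this
                exact this (List.isPrefixOf_iff_prefix.mp h)
              rw [PySem.Chars.count.go]
              simp only [Bool.not_eq_true] at hnp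
              rw [hnp]
              simp only [Bool.false_eq_true, if_false]
              rw [bladeTokens, hfind]
              exact IH t.length (by simp only [List.length_cons] at hn; omega) t f acc rfl
                (by simp only [List.length_cons] at hfu; omega)
          | some d' =>
              have hd'mem : d' ∈ bladeDirectives := List.mem_of_find?_eq_some hfind
              have hpref' : d'.toList <+: (c :: t) := by
                have := List.find?_some hfind
                simpa [PySem.Chars.startswith_iff] using this
              have hlen' : 1 ≤ d'.toList.length :=
                List.length_pos_of_ne_nil (blade_nonempty d' hd'mem)
              have hle' : d'.toList.length ≤ t.length + 1 := by
                simpa using hpref'.length_le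
              by_cases hdd : d' = d
              · subst hdd
                have hp : d'.toList.isPrefixOf (c :: t) = true :=
                  List.isPrefixOf_iff_prefix.mpr hpref'
                rw [PySem.Chars.count.go, hp]
                simp only [if_true]

                have hdrop : (c :: t).drop d'.toList.length = t.drop (d'.toList.length - 1) := by
                  obtain ⟨m, hm⟩ : ∃ m, d'.toList.length = m + 1 := ⟨_, (Nat.succ_pred_eq_of_pos hlen').symm⟩
                  rw [hm]; simp
                rw [hdrop, bladeTokens, hfind]
                have := IH (t.drop (d'.toList.length - 1)).length
                  (by simp only [List.length_cons] at hn; simp only [List.length_drop]; omega)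
                  (t.drop (d'.toList.length - 1)) f (acc + 1) rfl
                  (by simp only [List.length_cons] at hfu; simp only [List.length_drop]; omega)
                rw [this, List.count_cons_self]
                omega
              · -- another directive matched here; d does not, and cannot start inside d'
                have hnp : ¬ d.toList.isPrefixOf (c :: t) = true := by
                  intro h
                  exact hdd (blade_unique hd'mem hd hpref' (List.isPrefixOf_iff_prefix.mp h))
                rw [PySem.Chars.count.go]
                simp only [Bool.not_eq_true] at hnp
                rw [hnp]
                simp only [Bool.false_eq_true, if_false]
                set k := d'.toList.length - 1 with hk
                have hno : ∀ j, j < k → ¬ d.toList.isPrefixOf (t.drop j) = true := by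
                  intro j hj h
                  have hpre : d.toList <+: t.drop j := List.isPrefixOf_iff_prefix.mp h
                  -- head of t.drop j is d'[j+1], an interior character of d', hence not '@'
                  have hjlt : j + 1 < d'.toList.length := by omega
                  have hget : (c :: t)[j+1]? = d'.toList[j+1]? := by
                    rcases hpref' with ⟨r, hr⟩
                    rw [← hr, List.getElem?_append_left (by omega)]
                  have ht : t[j]? = d'.toList[j+1]? := by
                    simpa using hget
                  have hhead : (t.drop j).head? = d'.toList[j+1]? := by
                    rw [List.head?_eq_getElem?, List.getElem?_drop]
                    simpa using ht
                  have hdh : d.toList.head? = some '@' := blade_head d hd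
                  have : (t.drop j).head? = some '@' := by
                    rcases hpre with ⟨r, hr⟩
                    rw [← hr]
                    rcases hx : d.toList with _ | ⟨a, as⟩
                    · exact absurd hx (blade_nonempty d hd)
                    · simp only [hx] at hdh; simpa using hdh
                  rw [hhead] at this
                  exact blade_interior d' hd'mem (j+1) (by omega) hjlt this
                rw [go_skip d k t f acc (by omega) (by simp only [List.length_cons] at hfu; omega) hno]
                rw [bladeTokens, hfind]
                have hIH := IH (t.drop k).length
                  (by simp only [List.length_cons] at hn; simp only [List.length_drop]; omega)
                  (t.drop k) (f - k) acc rfl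
                  (by simp only [List.length_cons] at hfu; simp only [List.length_drop]; omega)
                rw [hIH, List.count_cons_of_ne hdd]

lemma count_eq_tokens_count (content d : String) (hd : d ∈ bladeDirectives) :
    PySem.Str.count content d = (bladeTokens content.toList).count d := by
  rw [PySem.Str.count_eq, PySem.Chars.count]
  have hne : d.toList.isEmpty = false := by
    simpa [List.isEmpty_iff] using blade_nonempty d hd
  rw [hne]
  simpa using count_go_tokens d hd content.toList.length content.toList content.toList.length 0 rfl le_rfl

-- a fold of conditional inserts with fresh, pairwise-distinct keys appends its items in order
lemma foldl_cond_insert_items (key : String → String) (val : String → Int) (pred : String → Prop)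
    [DecidablePred pred] :
    ∀ (ds : List String) (m : PySem.Dict String Int), (ds.map key).Nodup →
      (∀ x ∈ ds, m.contains (key x) = false) →
      (ds.foldl (fun m d => if pred d then m.insert (key d) (val d) else m) m).items
        = m.items ++ ds.filterMap (fun d => if pred d then some (key d, val d) else none) := by
  intro ds
  induction ds with
  | nil => intro m _ _; simp
  | cons d ds ih =>
      intro m hnd hfresh
      simp only [List.map_cons, List.nodup_cons] at hnd
      by_cases hp : pred d
      · simp only [List.foldl_cons, List.filterMap_cons, if_pos hp]
        rw [ih (m.insert (key d) (val d)) hnd.2 ?fresh]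
        · rw [PySem.Dict.items_insert_of_not_contains _ _ (hfresh d (by simp))]
          simp
        case fresh =>
          intro x hx
          rw [PySem.Dict.contains_insert]
          have h1 : (key x == key d) = false := by
            simp only [beq_eq_false_iff_ne, ne_eq]
            intro h
            exact hnd.1 (h ▸ List.mem_map_of_mem hx)
          rw [h1, hfresh x (by simp [hx])]
          simp
      · simp only [List.foldl_cons, List.filterMap_cons, if_neg hp]
        rw [ih m hnd.2 (fun x hx => hfresh x (by simp [hx]))]

-- the five per-directive entries agree
lemma entry_eq (content : String) (d : String) (hd : d ∈ bladeDirectives) :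
    (if (0:Int) < (PySem.Str.count content d : Int)
       then some (PySem.Str.replace d "@" "", (PySem.Str.count content d : Int)) else none)
      = (if (bladeScan content.toList PySem.Dict.empty).contains d = true
           then some (PySem.Str.slice d (some 1) none,
                      (bladeScan content.toList PySem.Dict.empty).getD d 0) else none) := by
  rw [bladeScan_empty, PySem.Dict.contains_counter, PySem.Dict.getD_counter,
      count_eq_tokens_count content d hd]
  have hkey : PySem.Str.replace d "@" "" = PySem.Str.slice d (some 1) none := by
    fin_cases hd <;> decide
  rw [hkey]
  by_cases hmem : d ∈ bladeTokens content.toList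
  · have h1 : (0:Int) < ((bladeTokens content.toList).count d : Int) := by
      exact_mod_cast List.count_pos_iff.mpr hmem
    have h2 : (bladeTokens content.toList).contains d = true := by
      simpa using hmem
    rw [if_pos h1, if_pos h2]
  · have h1 : ((bladeTokens content.toList).count d : Nat) = 0 :=
      List.count_eq_zero.mpr hmem
    have h2 : (bladeTokens content.toList).contains d = false := by
      simpa using hmem
    rw [h1, h2]
    simp

-- ===== VERDICT (by name: the statement is the Claim_ definition above) =====
theorem extract_blade_metadata_py_spec : Claim_equal_extract_blade_metadata_py := by
  intro content _
  unfold Spec_extract_blade_metadata_py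
  simp only [extract_blade_metadata_py, extract_blade_metadata_py_alt]
  rw [foldl_cond_insert_items (fun d => PySem.Str.replace d "@" "")
        (fun d => (PySem.Str.count content d : Int))
        (fun d => (0:Int) < (PySem.Str.count content d : Int))
        _ PySem.Dict.empty (by decide) (fun x _ => PySem.Dict.contains_empty _),
      foldl_cond_insert_items (fun d => PySem.Str.slice d (some 1) none)
        (fun d => (bladeScan content.toList PySem.Dict.empty).getD d 0)
        (fun d => (bladeScan content.toList PySem.Dict.empty).contains d = true)
        bladeDirectives PySem.Dict.empty (by decide) (fun x _ => PySem.Dict.contains_empty _)]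
  exact congrArg₂ _ rfl (List.filterMap_congr (fun d hd => entry_eq content d hd))
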